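-- pv_equiv track=rewrite | github.com/rkudipud/chopper | src/chopper/validator/functions.py | _glob_syntax_ok
-- ===== SOURCE A (Python) =====
-- def _glob_syntax_ok(pattern: str) -> bool:
--     """Reject patterns with unbalanced ``[`` brackets.
--
--     ``*``, ``?``, and ``**`` are always well-formed. The only syntactic
--     failure mode for fnmatch-style globs is an unterminated character
--     class ``[...]``; we walk the string once and flag the first unbalanced
--     bracket.
--     """
--
--     depth = 0
--     i = 0
--     while i < len(pattern):
--         ch = pattern[i]
--         if ch == "[":
--             if depth > 0:
--                 return False
--             depth += 1
--         elif ch == "]":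
--             if depth == 0:
--                 return False
--             depth -= 1
--         i += 1
--     return depth == 0
-- ===== SOURCE B (Python) =====
-- def _glob_syntax_ok(pattern: str) -> bool:
--     # Filter-then-compare: no depth counter, one structural equality.
--     s = ''.join(c for c in pattern if c in '[]')
--     return s == '[]' * (len(s) // 2)
-- ===== Notes on version B (the rewrite author's own statement) =====
-- stated objective: simpler
-- what changed: Replaces the index-walking depth-counter state machine with early returns by filtering the pattern down to its bracket characters and testing one equality against the open-close pair repeated half the filtered length times; the per-character Python loop becomes built-in string operations, a constant-factor speedup.
import Mathlib
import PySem

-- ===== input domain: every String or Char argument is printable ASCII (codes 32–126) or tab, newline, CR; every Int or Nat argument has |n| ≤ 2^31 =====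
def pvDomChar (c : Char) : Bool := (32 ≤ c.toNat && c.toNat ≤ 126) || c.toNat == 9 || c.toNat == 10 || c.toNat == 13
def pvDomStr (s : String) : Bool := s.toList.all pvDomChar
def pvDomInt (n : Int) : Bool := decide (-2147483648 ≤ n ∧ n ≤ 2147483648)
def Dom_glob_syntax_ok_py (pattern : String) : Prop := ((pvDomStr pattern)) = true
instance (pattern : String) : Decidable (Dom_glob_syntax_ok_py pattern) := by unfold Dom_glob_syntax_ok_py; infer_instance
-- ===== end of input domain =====

-- B replaces A's depth-counter state machine by a filter of the bracket characters
-- and a single equality against the alternation "[]" repeated (objective: simpler).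

-- ===== PORT A =====
-- A's while-loop over indices with the running depth, ported as the obvious
-- structural recursion over the character list with the same depth state.
def globLoopA : List Char → Int → Bool
  | [], depth => depth == 0
  | ch :: rest, depth =>
    if ch == '[' then
      if depth > 0 then false else globLoopA rest (depth + 1)
    else if ch == ']' then
      if depth == 0 then false else globLoopA rest (depth - 1)
    else globLoopA rest depth

def glob_syntax_ok_py (pattern : String) : Bool := globLoopA pattern.toList 0

-- ===== PORT B =====
-- '[]' * (len(s) // 2)
def altTarget (n : Nat) : List Char := (List.replicate (n / 2) (['[', ']'] : List Char)).flatten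

def glob_syntax_ok_py_alt (pattern : String) : Bool :=
  let s := pattern.toList.filter (fun c => c == '[' || c == ']')
  s == altTarget s.length

-- ===== PRECONDITION & SPEC =====
def Spec_glob_syntax_ok_py (pattern : String) (out : Bool) : Prop := out = glob_syntax_ok_py_alt pattern
instance (pattern : String) (out : Bool) : Decidable (Spec_glob_syntax_ok_py pattern out) := by unfold Spec_glob_syntax_ok_py; infer_instance

-- ===== CLAIM (what is proved, stated in full; the proofs are below) =====
def Claim_equal_glob_syntax_ok_py : Prop := ∀ (pattern : String), Dom_glob_syntax_ok_py pattern → Spec_glob_syntax_ok_py pattern (glob_syntax_ok_py pattern)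

-- ===== LEMMAS AND PROOFS =====

-- globLoopA ignores non-bracket characters.
theorem globLoopA_filter (l : List Char) : ∀ d,
    globLoopA l d = globLoopA (l.filter (fun c => c == '[' || c == ']')) d := by
  induction l with
  | nil => intro d; rfl
  | cons c rest ih =>
    intro d
    by_cases h1 : c = '['
    · subst h1
      simp only [List.filter_cons, globLoopA]
      split <;> simp_all [globLoopA]
    · by_cases h2 : c = ']'
      · subst h2
        simp only [List.filter_cons, globLoopA]
        split <;> simp_all [globLoopA]
      · simp [globLoopA, h1, h2, ih]

theorem altTarget_shape (n : Nat) :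
    altTarget n = [] ∨ ∃ t, altTarget n = '[' :: ']' :: t := by
  unfold altTarget
  cases h : n / 2 with
  | zero => left; simp
  | succ k => right; exact ⟨(List.replicate k (['[', ']'] : List Char)).flatten, by simp [List.replicate_succ]⟩

theorem altTarget_add_two (n : Nat) : altTarget (n + 2) = '[' :: ']' :: altTarget n := by
  unfold altTarget
  have : (n + 2) / 2 = n / 2 + 1 := Nat.add_div_right n (by norm_num)
  simp [this, List.replicate_succ]

-- On an all-bracket list, A's loop from depth 0 decides exactly "f is ([])^k".
theorem key (n : Nat) : ∀ (f : List Char), f.length ≤ n →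
    (∀ c ∈ f, c = '[' ∨ c = ']') →
    (globLoopA f 0 = true ↔ f = altTarget f.length) := by
  induction n with
  | zero =>
    intro f hf _
    have : f = [] := List.eq_nil_of_length_eq_zero (Nat.le_zero.mp hf)
    subst this
    simp [globLoopA, altTarget]
  | succ n ih =>
    intro f hf hmem
    match f with
    | [] => simp [globLoopA, altTarget]
    | c :: rest =>
      rcases hmem c (by simp) with hc | hc
      · subst hc
        match rest with
        | [] =>
          constructor
          · intro h; exact absurd h (by decide)
          · intro h; exact absurd h (by decide)
        | c2 :: rest2 =>
          rcases hmem c2 (by simp) with hc2 | hc2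
          · subst hc2
            constructor
            · intro h
              simp [globLoopA] at h
            · intro h
              rcases altTarget_shape ('[' :: '[' :: rest2).length with hsh | ⟨t, hsh⟩
              · rw [hsh] at h; exact absurd h (by simp)
              · rw [hsh] at h; simp at h
          · subst hc2
            have hlen : rest2.length ≤ n := by
              simp at hf; omega
            have hmem2 : ∀ c ∈ rest2, c = '[' ∨ c = ']' := by
              intro c hmemc; exact hmem c (by simp [hmemc])
            have hstep : globLoopA ('[' :: ']' :: rest2) 0 = globLoopA rest2 0 := by
              simp [globLoopA]
            have htl : ('[' :: ']' :: rest2).length = rest2.length + 2 := by simp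
            rw [hstep, htl, altTarget_add_two]
            rw [ih rest2 hlen hmem2]
            constructor
            · intro h; exact congrArg (fun t => '[' :: ']' :: t) h
            · intro h; exact (List.cons.injEq _ _ _ _).mp ((List.cons.injEq _ _ _ _).mp h).2 |>.2
      · subst hc
        constructor
        · intro h
          simp [globLoopA] at h
        · intro h
          rcases altTarget_shape (']' :: rest).length with hsh | ⟨t, hsh⟩
          · rw [hsh] at h; exact absurd h (by simp)
          · rw [hsh] at h; simp at h

-- ===== VERDICT (by name: the statement is the Claim_ definition above) =====
theorem glob_syntax_ok_py_spec : Claim_equal_glob_syntax_ok_py := by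
  intro pattern _
  unfold Spec_glob_syntax_ok_py glob_syntax_ok_py glob_syntax_ok_py_alt
  set f := pattern.toList.filter (fun c => c == '[' || c == ']') with hfdef
  have hmem : ∀ c ∈ f, c = '[' ∨ c = ']' := by
    intro c hc
    have := (List.mem_filter.mp hc).2
    rcases Bool.or_eq_true_iff.mp this with h | h
    · left; exact eq_of_beq h
    · right; exact eq_of_beq h
  rw [globLoopA_filter]
  have h := key f.length f le_rfl hmem
  apply Bool.eq_iff_iff.mpr
  simpa [beq_iff_eq] using h
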